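-- pv_equiv track=rewrite | github.com/indizen0/Python-basics | arrays.py | check_string_permu
-- ===== SOURCE A (Python) =====
-- def check_string_permu(String1, String2):
--     for char1 in String1:
--         for i in range(0,len(String2)):
--             if char1 == String2[i]:
--                 if i == 0:
--                     String2 = String2[i+1:]
--                 else:
--                     String2 = String2[:i]+String2[i+1:]
--                 break
--     if len(String2) == 0:
--         return True
--     else:
--         return False
-- ===== SOURCE B (Python) =====
-- def check_string_permu(String1, String2):
--     s1 = sorted(String1)
--     s2 = sorted(String2)
--     i = j = 0
--     while i < len(s1) and j < len(s2):
--         if s1[i] == s2[j]: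
--             i += 1
--             j += 1
--         elif s1[i] < s2[j]:
--             i += 1
--         else:
--             return False
--     return j == len(s2)
-- ===== Notes on version B (the rewrite author's own statement) =====
-- stated objective: faster
-- what changed: Replaces A's repeated inner scan-and-remove over String2 (quadratic removal by slicing) with sorting both strings once and a single two-pointer merge pass checking String2 is a sub-multiset of String1.
import Mathlib
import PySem

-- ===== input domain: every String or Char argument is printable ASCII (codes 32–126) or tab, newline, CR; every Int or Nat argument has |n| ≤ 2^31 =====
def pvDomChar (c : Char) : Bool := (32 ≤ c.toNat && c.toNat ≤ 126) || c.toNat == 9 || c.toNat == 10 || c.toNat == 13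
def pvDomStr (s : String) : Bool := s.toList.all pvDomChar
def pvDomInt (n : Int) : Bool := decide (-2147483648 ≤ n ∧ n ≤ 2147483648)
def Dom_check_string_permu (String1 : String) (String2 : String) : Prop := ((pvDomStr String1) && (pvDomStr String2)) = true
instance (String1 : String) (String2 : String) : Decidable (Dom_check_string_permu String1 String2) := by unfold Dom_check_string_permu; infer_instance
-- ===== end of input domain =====

-- B sorts both strings and does one two-pointer merge pass instead of A's repeated scan-and-remove; objective: faster.


-- ===== PORT A =====
def innerLoop (char1 : Char) (s2 : List Char) (i : Nat) : List Char :=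
  if h : i < s2.length then
    if char1 = s2[i] then
      if i = 0 then
        PySem.List.slice s2 (some ((i : Int) + 1)) none
      else
        PySem.List.slice s2 none (some (i : Int)) ++ PySem.List.slice s2 (some ((i : Int) + 1)) none
    else innerLoop char1 s2 (i + 1)
  else s2
termination_by s2.length - i

def check_string_permu (String1 : String) (String2 : String) : Bool :=
  let s2 := String1.toList.foldl (fun s2 char1 => innerLoop char1 s2 0) String2.toList
  if s2.length = 0 then true else false

-- ===== PORT B =====
def mergeGo : List Char → List Char → Bool
  | c :: s1, b :: s2 =>
      if c = b then mergeGo s1 s2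
      else if c < b then mergeGo s1 (b :: s2)
      else false
  | _, s2 => s2.isEmpty

def check_string_permu_alt (String1 : String) (String2 : String) : Bool :=
  mergeGo (PySem.List.sorted String1.toList (fun x => x) false)
          (PySem.List.sorted String2.toList (fun x => x) false)

-- ===== PRECONDITION & SPEC =====
def Spec_check_string_permu (String1 : String) (String2 : String) (out : Bool) : Prop := out = check_string_permu_alt String1 String2
instance (String1 : String) (String2 : String) (out : Bool) : Decidable (Spec_check_string_permu String1 String2 out) := by unfold Spec_check_string_permu; infer_instance

-- ===== CLAIM (what is proved, stated in full; the proofs are below) =====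
def Claim_equal_check_string_permu : Prop := ∀ (String1 : String) (String2 : String), Dom_check_string_permu String1 String2 → Spec_check_string_permu String1 String2 (check_string_permu String1 String2)

-- ===== LEMMAS AND PROOFS =====

lemma innerLoop_eq (char1 : Char) (s2 : List Char) (i : Nat) :
    innerLoop char1 s2 i = s2.take i ++ (s2.drop i).erase char1 := by
  induction i using innerLoop.induct (char1 := char1) (s2 := s2) with
  | case1 h heq =>
      rw [innerLoop]
      simp only [h, heq, dif_pos, if_pos, Nat.cast_zero, zero_add]
      have h1 : PySem.List.slice s2 (some (1:Int)) none = s2.drop 1 := by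
        simpa using PySem.List.slice_from_natCast (xs := s2) (a := 1)
      rw [h1]
      obtain ⟨a, t, rfl⟩ := List.exists_cons_of_ne_nil (l := s2) (by intro e; subst e; simp at h)
      simp at heq
      simp [List.erase_cons_head]
  | case2 i h heq hi =>
      rw [innerLoop]
      simp only [h, heq, hi, dif_pos, if_pos, if_false]
      have h1 : PySem.List.slice s2 none (some (i:Int)) = s2.take i :=
        PySem.List.slice_to_natCast s2 i
      have h2 : PySem.List.slice s2 (some ((i:Int) + 1)) none = s2.drop (i+1) := by
        simpa using PySem.List.slice_from_natCast (xs := s2) (a := i+1)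
      rw [h1, h2]
      have hd : s2.drop i = s2[i] :: s2.drop (i+1) := List.drop_eq_getElem_cons h
      rw [hd, ← heq, List.erase_cons_head]
  | case3 i h heq ih =>
      rw [innerLoop]
      simp only [h, heq, dif_pos, if_neg, not_false_iff]
      rw [ih]
      have hd : s2.drop i = s2[i] :: s2.drop (i+1) := List.drop_eq_getElem_cons h
      have ht : s2.take (i+1) = s2.take i ++ [s2[i]] := by
        rw [List.take_add_one]
        simp [List.getElem?_eq_getElem h]
      rw [hd, List.erase_cons_tail (by simp; exact fun e => heq e.symm), ht,
        List.append_assoc]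
      rfl
  | case4 i h =>
      rw [innerLoop]
      simp only [h, dif_neg, not_false_iff]
      rw [List.take_of_length_le (by omega), List.drop_of_length_le (by omega)]
      simp

lemma innerLoop_zero (c : Char) (s2 : List Char) : innerLoop c s2 0 = s2.erase c := by
  rw [innerLoop_eq]; simp

lemma foldl_erase_multiset (s1 : List Char) : ∀ s2 : List Char,
    ((s1.foldl (fun s2 c => s2.erase c) s2 : List Char) : Multiset Char) =
      (s2 : Multiset Char) - (s1 : Multiset Char) := by
  induction s1 with
  | nil => intro s2; simp
  | cons a s1 ih =>
      intro s2
      simp only [List.foldl_cons, ih]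
      rw [← Multiset.cons_coe, Multiset.sub_cons, ← Multiset.coe_erase]

lemma sorted_head_le (c : Char) (s : List Char) (hp : (c :: s).Pairwise (· ≤ ·)) :
    ∀ x ∈ c :: s, c ≤ x := by
  intro x hx
  rcases List.mem_cons.mp hx with rfl | hx
  · exact le_rfl
  · exact (List.pairwise_cons.mp hp).1 x hx

lemma mergeGo_iff (s1 : List Char) : ∀ s2 : List Char,
    s1.Pairwise (· ≤ ·) → s2.Pairwise (· ≤ ·) →
    (mergeGo s1 s2 = true ↔ (s2 : Multiset Char) ≤ (s1 : Multiset Char)) := by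
  induction s1 with
  | nil =>
      intro s2 _ _
      cases s2 with
      | nil => simp [mergeGo]
      | cons b s2 => simp [mergeGo]
  | cons c s1 ih =>
      intro s2 hp1 hp2
      cases s2 with
      | nil => simp [mergeGo]
      | cons b s2 =>
          simp only [mergeGo]
          by_cases hcb : c = b
          · subst hcb
            simp only [if_true]
            rw [ih s2 (List.pairwise_cons.mp hp1).2 (List.pairwise_cons.mp hp2).2]
            rw [← Multiset.cons_coe, ← Multiset.cons_coe]
            exact (Multiset.cons_le_cons_iff c).symm
          · simp only [if_neg hcb]
            by_cases hlt : c < b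
            · simp only [if_pos hlt]
              rw [ih (b :: s2) (List.pairwise_cons.mp hp1).2 hp2]
              constructor
              · intro hle
                rw [← Multiset.cons_coe]
                exact le_trans hle (Multiset.le_cons_self _ _)
              · intro hle
                rw [Multiset.le_iff_count] at hle ⊢
                intro x
                have := hle x
                by_cases hx : x = c
                · subst hx
                  have hnm : x ∉ b :: s2 := fun hm =>
                    absurd (sorted_head_le b s2 hp2 x hm) (not_le.mpr hlt)
                  have hz : Multiset.count x ((b :: s2 : List Char) : Multiset Char) = 0 := by
                    rw [Multiset.count_eq_zero]
                    simpa using hnm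
                  rw [hz]
                  exact Nat.zero_le _
                · have hc : Multiset.count x ((c :: s1 : List Char) : Multiset Char)
                      = Multiset.count x (s1 : Multiset Char) := by
                    rw [← Multiset.cons_coe, Multiset.count_cons_of_ne hx]
                  rw [hc] at this
                  exact this
            · simp only [if_neg hlt]
              constructor
              · intro e; exact absurd e (by simp)
              · intro hle
                exfalso
                have hbc : b < c := lt_of_le_of_ne (le_of_not_gt hlt) (fun e => hcb e.symm)
                have hnm : b ∉ c :: s1 := by
                  intro hm
                  exact absurd (sorted_head_le c s1 hp1 b hm) (not_le.mpr hbc)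
                have h1 : Multiset.count b ((b :: s2 : List Char) : Multiset Char) ≥ 1 := by
                  simp
                have h2 : Multiset.count b ((c :: s1 : List Char) : Multiset Char) = 0 := by
                  rw [Multiset.count_eq_zero]
                  simpa using hnm
                have := Multiset.le_iff_count.mp hle b
                omega

-- ===== VERDICT (by name: the statement is the Claim_ definition above) =====
theorem check_string_permu_spec : Claim_equal_check_string_permu := by
  intro S1 S2 _
  unfold Spec_check_string_permu check_string_permu check_string_permu_alt
  have hfold : S1.toList.foldl (fun s2 char1 => innerLoop char1 s2 0) S2.toList
      = S1.toList.foldl (fun s2 c => s2.erase c) S2.toList := by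
    have hf : (fun (s2 : List Char) (char1 : Char) => innerLoop char1 s2 0)
        = fun s2 c => s2.erase c := by
      funext s2 c
      exact innerLoop_zero c s2
    rw [hf]
  have hiff : (S1.toList.foldl (fun s2 c => s2.erase c) S2.toList).length = 0
      ↔ (S2.toList : Multiset Char) ≤ (S1.toList : Multiset Char) := by
    rw [List.length_eq_zero_iff, ← Multiset.coe_eq_zero,
      foldl_erase_multiset S1.toList S2.toList, tsub_eq_zero_iff_le]
  have hA : (if (S1.toList.foldl (fun s2 char1 => innerLoop char1 s2 0) S2.toList).length = 0
        then true else false) = true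
      ↔ (S2.toList : Multiset Char) ≤ (S1.toList : Multiset Char) := by
    rw [hfold]
    constructor
    · intro he
      split_ifs at he with h
      exact hiff.mp h
    · intro hle
      rw [if_pos (hiff.mpr hle)]
  have hp1 : (PySem.List.sorted S1.toList (fun x => x) false).Pairwise (· ≤ ·) := by
    simpa using PySem.List.sorted_pairwise (xs := S1.toList) (key := fun x => x)
  have hp2 : (PySem.List.sorted S2.toList (fun x => x) false).Pairwise (· ≤ ·) := by
    simpa using PySem.List.sorted_pairwise (xs := S2.toList) (key := fun x => x)
  have hB : mergeGo (PySem.List.sorted S1.toList (fun x => x) false)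
        (PySem.List.sorted S2.toList (fun x => x) false) = true
      ↔ (S2.toList : Multiset Char) ≤ (S1.toList : Multiset Char) := by
    rw [mergeGo_iff _ _ hp1 hp2,
      Multiset.coe_eq_coe.mpr
        (PySem.List.sorted_perm (xs := S1.toList) (key := fun x => x) (rev := false)),
      Multiset.coe_eq_coe.mpr
        (PySem.List.sorted_perm (xs := S2.toList) (key := fun x => x) (rev := false))]
  show (if _ then true else false) = _
  rw [Bool.eq_iff_iff, hA, hB]
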